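-- pv_equiv track=rewrite | github.com/CSalcedoDataBI/BI_Challenges | EXCEL_BI/416_EXCEL_CHALLENGE/files/416_EXCEL_CHALLENGE_PySpark.py | hierarchical_numbering
-- ===== SOURCE A (Python) =====
-- def hierarchical_numbering(rows):
--     result = []
--     counters = [0] * (max(len(row['Strings']) for row in rows) + 1)
--
--     for row in rows:
--         level = len(row['Strings'])
--         counters[level] += 1
--         for l in range(level + 1, len(counters)):
--             counters[l] = 0
--         number = '.'.join(str(counters[l]) for l in range(1, level + 1))
--         result.append((row['Strings'], number))
--     return result
-- ===== SOURCE B (Python) =====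
-- def hierarchical_numbering(rows):
--     # Stateless per-row recomputation: no running counters at all.  The l-th
--     # dotted component of row i is the number of rows j <= i at exactly depth l
--     # since the last row shallower than l (a backward scan that stops there).
--     levels = [len(row['Strings']) for row in rows]
--     result = []
--     for i, row in enumerate(rows):
--         parts = []
--         for l in range(1, levels[i] + 1):
--             c = 0
--             j = i
--             while j >= 0 and levels[j] >= l:
--                 if levels[j] == l:
--                     c += 1
--                 j -= 1
--             parts.append(str(c))
--         result.append((row['Strings'], '.'.join(parts)))
--     return result
-- ===== Notes on version B (the rewrite author's own statement) =====
-- stated objective: alternative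
-- what changed: Drops A's running mutable counter array (increment + reset loop per row) entirely: B recomputes each dotted component of each row from scratch by a backward scan that counts rows at exactly that depth until it hits a shallower row, so no state is carried between rows.
import Mathlib
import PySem

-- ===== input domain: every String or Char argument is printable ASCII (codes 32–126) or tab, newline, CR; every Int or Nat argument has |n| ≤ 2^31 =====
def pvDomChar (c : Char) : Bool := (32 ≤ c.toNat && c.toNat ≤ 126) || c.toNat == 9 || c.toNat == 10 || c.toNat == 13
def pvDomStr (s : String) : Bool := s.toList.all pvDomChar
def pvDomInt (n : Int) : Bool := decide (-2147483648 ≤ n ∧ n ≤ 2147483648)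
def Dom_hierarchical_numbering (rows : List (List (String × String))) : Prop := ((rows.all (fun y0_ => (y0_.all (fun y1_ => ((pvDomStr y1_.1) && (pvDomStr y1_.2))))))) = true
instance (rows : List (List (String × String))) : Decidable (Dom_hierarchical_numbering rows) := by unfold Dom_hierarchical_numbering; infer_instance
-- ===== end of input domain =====

-- B drops A's running counter array and recomputes each dotted component per row by a
-- stateless backward scan (alternative decomposition; same return value on Pre_).

-- ===== PORT A =====
-- row['Strings']; KeyError (get? = none) is excluded by Pre_, so the "" default is never read
def hnLookup (row : List (String × String)) : String :=
  ((PySem.Dict.mk row).get? "Strings").getD ""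

-- one iteration of A's for-loop over rows; state = (counters, result)
def hnStepA (st : List Int × List (String × String)) (row : List (String × String)) :
    List Int × List (String × String) :=
  let level := (hnLookup row).toList.length
  let c1 := st.1.set level (st.1.getD level 0 + 1)                      -- counters[level] += 1
  let c2 := (List.range' (level + 1) (c1.length - (level + 1))).foldl    -- for l in range(level+1, len(counters)): counters[l] = 0
      (fun c l => c.set l 0) c1
  let number := PySem.Str.join "."
      ((List.range' 1 level).map (fun l => PySem.Int.toStr (c2.getD l 0)))
  (c2, st.2 ++ [(hnLookup row, number)])

def hierarchical_numbering (rows : List (List (String × String))) : List (String × String) :=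
  -- max(...) raises ValueError on empty rows: Pre_ excludes rows = [], so the 0 default is never used
  let m := ((rows.map (fun row => (hnLookup row).toList.length)).max?).getD 0
  (rows.foldl hnStepA (List.replicate (m + 1) 0, [])).2

-- ===== PORT B =====
-- B's inner 'while j >= 0 and levels[j] >= l' backward scan, recursing on j
def hnScan (levels : List Nat) (l : Nat) : Nat → Int
  | 0 =>
    let lev := levels.getD 0 0
    if lev < l then 0 else if lev = l then 1 else 0
  | j + 1 =>
    let lev := levels.getD (j + 1) 0
    if lev < l then 0 else (if lev = l then 1 else 0) + hnScan levels l j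

-- '.'.join(parts) for row index i of level L
def hnNum (levels : List Nat) (i L : Nat) : String :=
  PySem.Str.join "." ((List.range' 1 L).map (fun l => PySem.Int.toStr (hnScan levels l i)))

-- B's outer loop over rows carrying the enumerate index i
def hnBuild (levels : List Nat) : List (List (String × String)) → Nat → List (String × String)
  | [], _ => []
  | row :: rest, i => (hnLookup row, hnNum levels i (levels.getD i 0)) :: hnBuild levels rest (i + 1)

def hierarchical_numbering_alt (rows : List (List (String × String))) : List (String × String) :=
  let levels := rows.map (fun row => (hnLookup row).toList.length)
  hnBuild levels rows 0

-- ===== PRECONDITION & SPEC =====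
-- Pre_ excludes exactly the inputs where the Python A raises: empty rows (ValueError from
-- max() of an empty generator) and rows missing the 'Strings' key (KeyError).
def Pre_hierarchical_numbering (rows : List (List (String × String))) : Prop :=
  rows ≠ [] ∧ ∀ row ∈ rows, ((PySem.Dict.mk row).get? "Strings").isSome = true
instance (rows : List (List (String × String))) : Decidable (Pre_hierarchical_numbering rows) := by
  unfold Pre_hierarchical_numbering; infer_instance

def pvWitness_hierarchical_numbering : (List (List (String × String))) :=
  [[("Strings", "a")], [("Strings", "ab")], [("Strings", "")]]

def Spec_hierarchical_numbering (rows : List (List (String × String))) (out : List (String × String)) : Prop := out = hierarchical_numbering_alt rows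
instance (rows : List (List (String × String))) (out : List (String × String)) : Decidable (Spec_hierarchical_numbering rows out) := by unfold Spec_hierarchical_numbering; infer_instance

-- ===== CLAIM (what is proved, stated in full; the proofs are below) =====
def Claim_equal_hierarchical_numbering : Prop := ∀ (rows : List (List (String × String))), Dom_hierarchical_numbering rows → Pre_hierarchical_numbering rows → Spec_hierarchical_numbering rows (hierarchical_numbering rows)

-- ===== LEMMAS AND PROOFS =====

-- prefix-counting reformulation of hnScan: count over indices < i
def hnScanLen (levels : List Nat) (l : Nat) : Nat → Int
  | 0 => 0
  | i + 1 =>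
    let lev := levels.getD i 0
    if lev < l then 0 else (if lev = l then 1 else 0) + hnScanLen levels l i

lemma hnScan_eq_len (levels : List Nat) (l : Nat) :
    ∀ i, hnScan levels l i = hnScanLen levels l (i + 1) := by
  intro i
  induction i with
  | zero => simp [hnScan, hnScanLen]
  | succ j ih => simp [hnScan, hnScanLen, ih]

lemma hn_getD_of_len_le (c : List Int) (j : Nat) (h : c.length ≤ j) : c.getD j 0 = 0 := by
  simp [List.getD_eq_getElem?_getD, List.getElem?_eq_none h]

lemma hn_getD_set (c : List Int) (a j : Nat) (v : Int) :
    (c.set a v).getD j 0 = if j = a ∧ a < c.length then v else c.getD j 0 := by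
  by_cases h1 : j = a
  · subst h1
    by_cases h2 : j < c.length
    · simp [List.getD_eq_getElem?_getD, h2]
    · have hle : c.length ≤ j := by omega
      rw [if_neg (by simp [h2])]
      rw [hn_getD_of_len_le c j hle, hn_getD_of_len_le _ j (by simpa using hle)]
  · have : a ≠ j := fun h => h1 h.symm
    simp [List.getD_eq_getElem?_getD, List.getElem?_set_ne this, h1]

lemma hn_foldl_set_zero (n : Nat) : ∀ (a : Nat) (c : List Int) (j : Nat),
    (((List.range' a n).foldl (fun c l => c.set l 0) c).getD j 0) =
      if a ≤ j ∧ j < a + n then 0 else c.getD j 0 := by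
  induction n with
  | zero => intro a c j; rw [List.range'_zero, List.foldl_nil, if_neg (by omega)]
  | succ n ih =>
    intro a c j
    rw [List.range'_succ, List.foldl_cons, ih, hn_getD_set]
    by_cases h1 : a + 1 ≤ j ∧ j < a + 1 + n
    · rw [if_pos h1, if_pos (by omega)]
    · rw [if_neg h1]
      by_cases h2 : j = a ∧ a < c.length
      · rw [if_pos h2, if_pos (by omega)]
      · rw [if_neg h2]
        by_cases h3 : a ≤ j ∧ j < a + (n + 1)
        · rw [if_pos h3]
          exact hn_getD_of_len_le c j (by omega)
        · rw [if_neg h3]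

lemma hn_foldl_set_length (n : Nat) : ∀ (a : Nat) (c : List Int),
    ((List.range' a n).foldl (fun c l => c.set l 0) c).length = c.length := by
  induction n with
  | zero => intro a c; rw [List.range'_zero, List.foldl_nil]
  | succ n ih => intro a c; rw [List.range'_succ, List.foldl_cons, ih]; simp

-- every level in the list is bounded by the maximum A computes up front
lemma hn_le_max (levels : List Nat) (x : Nat) (h : x ∈ levels) :
    x ≤ levels.max?.getD 0 := by
  cases hmax : levels.max? with
  | none => rw [List.max?_eq_none_iff.mp hmax] at h; cases h
  | some v => simpa using (List.max?_eq_some_iff.mp hmax).2 _ h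

-- main loop correspondence: A's foldl from a counter state describing prefix i
-- produces exactly B's hnBuild output for the remaining rows
lemma hn_main (levels : List Nat) (m : Nat) (hlev : ∀ x ∈ levels, x ≤ m) :
    ∀ (rest : List (List (String × String))) (i : Nat) (c : List Int)
      (acc : List (String × String)),
      i + rest.length = levels.length →
      (∀ (k : Nat) (h : k < rest.length),
        (hnLookup rest[k]).toList.length = levels.getD (i + k) 0) →
      c.length = m + 1 →
      (∀ l, 1 ≤ l → c.getD l 0 = hnScanLen levels l i) →
      (rest.foldl hnStepA (c, acc)).2 = acc ++ hnBuild levels rest i := by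
  intro rest
  induction rest with
  | nil => intro i c acc _ _ _ _; simp [hnBuild]
  | cons row rest' ih =>
    intro i c acc hlen hrest hclen hinv
    have hiLt : i < levels.length := by simp at hlen; omega
    have hrow : (hnLookup row).toList.length = levels.getD i 0 := by
      have := hrest 0 (by simp)
      simpa using this
    set L := levels.getD i 0 with hL
    have hLm : L ≤ m := by
      have : levels.getD i 0 = levels[i] := by
        simp [List.getD_eq_getElem?_getD, List.getElem?_eq_getElem hiLt]
      rw [hL, this]; exact hlev _ (List.getElem_mem hiLt)
    -- the counter state after this step
    set c1 : List Int := c.set L (c.getD L 0 + 1) with hc1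
    have hc1len : c1.length = m + 1 := by simp [hc1, hclen]
    have hc1get : ∀ j : Nat, c1.getD j 0 = if j = L then c.getD L 0 + 1 else c.getD j 0 := by
      intro j
      rw [hc1, hn_getD_set]
      by_cases hj : j = L
      · rw [if_pos hj, if_pos ⟨hj, by omega⟩]
      · rw [if_neg (by simp [hj]), if_neg hj]
    set c2 : List Int :=
      (List.range' (L + 1) (c1.length - (L + 1))).foldl (fun c l => c.set l 0) c1 with hc2
    have hc2len : c2.length = m + 1 := by rw [hc2, hn_foldl_set_length, hc1len]
    have hc2get : ∀ j : Nat, c2.getD j 0 = if L + 1 ≤ j then 0 else c1.getD j 0 := by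
      intro j
      rw [hc2, hn_foldl_set_zero, hc1len]
      by_cases h1 : L + 1 ≤ j ∧ j < L + 1 + (m + 1 - (L + 1))
      · rw [if_pos h1, if_pos (by omega)]
      · rw [if_neg h1]
        by_cases h2 : L + 1 ≤ j
        · rw [if_pos h2]
          exact hn_getD_of_len_le c1 j (by omega)
        · rw [if_neg h2]
    have hinv' : ∀ l, 1 ≤ l → c2.getD l 0 = hnScanLen levels l (i + 1) := by
      intro l hl
      have hstep : hnScanLen levels l (i + 1) =
          if L < l then 0 else (if L = l then 1 else 0) + hnScanLen levels l i := by
        simp [hnScanLen, hL]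
      rw [hc2get, hc1get, hstep]
      by_cases h1 : L + 1 ≤ l
      · rw [if_pos h1, if_pos (by omega)]
      · rw [if_neg h1]
        by_cases h2 : l = L
        · rw [if_pos h2, if_neg (by omega), if_pos h2.symm, h2, hinv L (by omega)]; ring
        · rw [if_neg h2, if_neg (by omega), if_neg (fun h => h2 h.symm), hinv l hl]; ring
    -- the appended pair equals B's head
    have hnumeq : PySem.Str.join "."
        ((List.range' 1 L).map (fun l => PySem.Int.toStr (c2.getD l 0))) =
        hnNum levels i L := by
      unfold hnNum
      congr 1
      apply List.map_congr_left
      intro l hl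
      have hl1 : 1 ≤ l := by
        have h : 1 ≤ l ∧ l < 1 + L := by simpa using hl
        omega
      rw [hinv' l hl1, hnScan_eq_len]
    have hstepA : hnStepA (c, acc) row =
        (c2, acc ++ [(hnLookup row, hnNum levels i L)]) := by
      show (_, _) = _
      rw [show (hnLookup row).toList.length = L from hrow]
      exact Prod.ext rfl (by rw [hnumeq])
    rw [List.foldl_cons, hstepA,
      ih (i + 1) c2 _ (by simp at hlen ⊢; omega)
        (fun k hk => by
          have := hrest (k + 1) (by simp; omega)
          simpa [Nat.add_assoc, Nat.add_comm 1 k] using this)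
        hc2len hinv']
    simp [hnBuild]
    rfl

-- ===== VERDICT (by name: the statement is the Claim_ definition above) =====
theorem hierarchical_numbering_spec : Claim_equal_hierarchical_numbering := by
  intro rows _ _
  unfold Spec_hierarchical_numbering hierarchical_numbering hierarchical_numbering_alt
  rw [hn_main (rows.map (fun row => (hnLookup row).toList.length))
      (((rows.map (fun row => (hnLookup row).toList.length)).max?).getD 0)
      (fun x hx => hn_le_max _ x hx) rows 0 _ [] (by simp)
      (fun k hk => by
        simp [List.getD_eq_getElem?_getD, List.getElem?_map, List.getElem?_eq_getElem hk])
      (by simp)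
      (fun l hl => by
        simp [hnScanLen, List.getD_eq_getElem?_getD, List.getElem?_replicate]
        split <;> rfl)]
  simp
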